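-- pv_equiv track=rewrite | github.com/dfkburnem/Ratcrawler | ratcrawler.py | count_ability_matches
-- ===== SOURCE A (Python) =====
-- def count_ability_matches(hero1, hero2, ability_type):
--     matches = 0
--     ability_pairs = []
--     if ability_type == "basic":
--         ability_pairs = [(0, 1), (2, 3), (4, 5), (6, 7)]
--     elif ability_type == "advanced":
--         ability_pairs = [(16, 17), (18, 19)]
--     elif ability_type == "elite":
--         ability_pairs = [(24, 25)]
--
--     for a1, a2 in ability_pairs:
--         if (hero1["active1"] == a1 and hero2["active1"] == a2) or (
--             hero1["active1"] == a2 and hero2["active1"] == a1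
--         ):
--             matches += 1
--         if (hero1["active2"] == a1 and hero2["active2"] == a2) or (
--             hero1["active2"] == a2 and hero2["active2"] == a1
--         ):
--             matches += 1
--         if (hero1["passive1"] == a1 and hero2["passive1"] == a2) or (
--             hero1["passive1"] == a2 and hero2["passive1"] == a1
--         ):
--             matches += 1
--         if (hero1["passive2"] == a1 and hero2["passive2"] == a2) or (
--             hero1["passive2"] == a2 and hero2["passive2"] == a1
--         ):
--             matches += 1
--
--     return matches
-- ===== SOURCE B (Python) =====
-- def count_ability_matches(hero1, hero2, ability_type):
--     # Each mode's pairs are exactly the consecutive pairs (2k, 2k+1) for k in a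
--     # contiguous range: basic k in 0..3, advanced k in 8..9, elite k = 12.  So a
--     # field matches iff the two values differ, share the same half (x // 2), and
--     # that half lies in the mode's range -- no pair table needed at all.
--     if ability_type == "basic":
--         lo, hi = 0, 3
--     elif ability_type == "advanced":
--         lo, hi = 8, 9
--     elif ability_type == "elite":
--         lo, hi = 12, 12
--     else:
--         return 0
--     return sum(
--         1
--         for f in ("active1", "active2", "passive1", "passive2")
--         if hero1[f] != hero2[f]
--         and hero1[f] // 2 == hero2[f] // 2
--         and lo <= hero1[f] // 2 <= hi
--     )
-- ===== Notes on version B (the rewrite author's own statement) =====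
-- stated objective: alternative
-- what changed: A's scan over an explicit pair table with two-way equality checks is replaced by a closed-form arithmetic test per field: the values match some mode pair iff they differ, have equal floor-halves x//2, and that half lies in the mode's contiguous range -- the pair lists disappear entirely.
import Mathlib
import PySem

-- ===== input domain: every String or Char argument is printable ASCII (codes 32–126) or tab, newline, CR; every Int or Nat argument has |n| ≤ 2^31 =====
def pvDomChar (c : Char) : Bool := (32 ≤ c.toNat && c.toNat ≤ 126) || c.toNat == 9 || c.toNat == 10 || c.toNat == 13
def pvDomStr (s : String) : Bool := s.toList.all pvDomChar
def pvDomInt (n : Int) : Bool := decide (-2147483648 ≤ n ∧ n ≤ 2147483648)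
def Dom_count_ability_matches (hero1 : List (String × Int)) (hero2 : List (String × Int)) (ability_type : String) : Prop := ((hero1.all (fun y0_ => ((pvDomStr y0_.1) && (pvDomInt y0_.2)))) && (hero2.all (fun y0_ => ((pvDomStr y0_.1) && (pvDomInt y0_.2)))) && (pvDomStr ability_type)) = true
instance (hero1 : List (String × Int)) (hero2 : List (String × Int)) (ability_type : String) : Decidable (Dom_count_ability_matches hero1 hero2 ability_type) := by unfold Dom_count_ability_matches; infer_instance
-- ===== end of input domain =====

-- B replaces A's scan over an explicit pair table with a per-field closed-form arithmetic test
-- (values differ, equal floor-halves x//2, half in the mode's contiguous range); objective: alternative.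

-- ===== PORT A =====
-- hero[k] is ported as List.lookup (first match); a missing key is Python's KeyError, excluded by
-- Pre_, where the comparison against `some _` is simply false.
def count_ability_matches (hero1 : List (String × Int)) (hero2 : List (String × Int)) (ability_type : String) : Int :=
  let ability_pairs : List (Int × Int) :=
    if ability_type = "basic" then [(0, 1), (2, 3), (4, 5), (6, 7)]
    else if ability_type = "advanced" then [(16, 17), (18, 19)]
    else if ability_type = "elite" then [(24, 25)]
    else []
  ability_pairs.foldl (fun mcount p =>
    let a1 := p.1
    let a2 := p.2
    let mcount := if (hero1.lookup "active1" = some a1 ∧ hero2.lookup "active1" = some a2) ∨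
        (hero1.lookup "active1" = some a2 ∧ hero2.lookup "active1" = some a1) then mcount + 1 else mcount
    let mcount := if (hero1.lookup "active2" = some a1 ∧ hero2.lookup "active2" = some a2) ∨
        (hero1.lookup "active2" = some a2 ∧ hero2.lookup "active2" = some a1) then mcount + 1 else mcount
    let mcount := if (hero1.lookup "passive1" = some a1 ∧ hero2.lookup "passive1" = some a2) ∨
        (hero1.lookup "passive1" = some a2 ∧ hero2.lookup "passive1" = some a1) then mcount + 1 else mcount
    let mcount := if (hero1.lookup "passive2" = some a1 ∧ hero2.lookup "passive2" = some a2) ∨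
        (hero1.lookup "passive2" = some a2 ∧ hero2.lookup "passive2" = some a1) then mcount + 1 else mcount
    mcount) 0

-- ===== PORT B =====
def pvFieldsB : List String := ["active1", "active2", "passive1", "passive2"]

-- the generator's sum: per field, the arithmetic match test x ≠ y ∧ x//2 = y//2 ∧ lo ≤ x//2 ≤ hi
-- (x // 2 is Python floor division, ported as PySem.Int.floordiv); a missing key is Python's
-- KeyError, excluded by Pre_
def pvCountB (hero1 : List (String × Int)) (hero2 : List (String × Int)) (lo hi : Int) : Int :=
  pvFieldsB.foldl (fun s f =>
    match hero1.lookup f, hero2.lookup f with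
    | some x, some y =>
      if x ≠ y ∧ PySem.Int.floordiv x 2 = PySem.Int.floordiv y 2 ∧
          lo ≤ PySem.Int.floordiv x 2 ∧ PySem.Int.floordiv x 2 ≤ hi then s + 1 else s
    | _, _ => s) 0

def count_ability_matches_alt (hero1 : List (String × Int)) (hero2 : List (String × Int)) (ability_type : String) : Int :=
  if ability_type = "basic" then pvCountB hero1 hero2 0 3
  else if ability_type = "advanced" then pvCountB hero1 hero2 8 9
  else if ability_type = "elite" then pvCountB hero1 hero2 12 12
  else 0

-- ===== PRECONDITION & SPEC =====
-- Pre_ excludes heroes missing one of the four ability fields when ability_type is basic/advanced/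
-- elite: there A usually raises KeyError, and on the rest (a hero2 field missing while hero1's value
-- matches no pair element, so `and` short-circuits) A returns 0 only by accident of evaluation order
-- while B, which looks both fields up, raises.
def Pre_count_ability_matches (hero1 : List (String × Int)) (hero2 : List (String × Int)) (ability_type : String) : Prop :=
  (ability_type = "basic" ∨ ability_type = "advanced" ∨ ability_type = "elite") →
    ∀ f ∈ (["active1", "active2", "passive1", "passive2"] : List String),
      (hero1.lookup f).isSome ∧ (hero2.lookup f).isSome
instance (hero1 : List (String × Int)) (hero2 : List (String × Int)) (ability_type : String) : Decidable (Pre_count_ability_matches hero1 hero2 ability_type) := by unfold Pre_count_ability_matches; infer_instance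

def pvWitness_count_ability_matches : (List (String × Int)) × (List (String × Int)) × String :=
  ([("active1", 0), ("active2", 2), ("passive1", 4), ("passive2", 6)],
   [("active1", 1), ("active2", 3), ("passive1", 5), ("passive2", 7)], "basic")

def Spec_count_ability_matches (hero1 : List (String × Int)) (hero2 : List (String × Int)) (ability_type : String) (out : Int) : Prop := out = count_ability_matches_alt hero1 hero2 ability_type
instance (hero1 : List (String × Int)) (hero2 : List (String × Int)) (ability_type : String) (out : Int) : Decidable (Spec_count_ability_matches hero1 hero2 ability_type out) := by unfold Spec_count_ability_matches; infer_instance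

-- ===== CLAIM (what is proved, stated in full; the proofs are below) =====
def Claim_equal_count_ability_matches : Prop := ∀ (hero1 : List (String × Int)) (hero2 : List (String × Int)) (ability_type : String), Dom_count_ability_matches hero1 hero2 ability_type → Pre_count_ability_matches hero1 hero2 ability_type → Spec_count_ability_matches hero1 hero2 ability_type (count_ability_matches hero1 hero2 ability_type)

-- ===== LEMMAS AND PROOFS =====

lemma pvStepAdd (c : Prop) [Decidable c] (m : Int) :
    (if c then m + 1 else m) = m + (if c then 1 else 0) := by
  split_ifs <;> ring

lemma pvFieldBasic (x y : Int) :
    ((if x = 0 ∧ y = 1 ∨ x = 1 ∧ y = 0 then (1:Int) else 0)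
      + (if x = 2 ∧ y = 3 ∨ x = 3 ∧ y = 2 then 1 else 0)
      + (if x = 4 ∧ y = 5 ∨ x = 5 ∧ y = 4 then 1 else 0)
      + (if x = 6 ∧ y = 7 ∨ x = 7 ∧ y = 6 then 1 else 0))
    = if ¬x = y ∧ x / 2 = y / 2 ∧ 0 ≤ x / 2 ∧ x / 2 ≤ 3 then 1 else 0 := by
  split_ifs <;> omega

lemma pvFieldAdvanced (x y : Int) :
    ((if x = 16 ∧ y = 17 ∨ x = 17 ∧ y = 16 then (1:Int) else 0)
      + (if x = 18 ∧ y = 19 ∨ x = 19 ∧ y = 18 then 1 else 0))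
    = if ¬x = y ∧ x / 2 = y / 2 ∧ 8 ≤ x / 2 ∧ x / 2 ≤ 9 then 1 else 0 := by
  split_ifs <;> omega

lemma pvFieldElite (x y : Int) :
    (if x = 24 ∧ y = 25 ∨ x = 25 ∧ y = 24 then (1:Int) else 0)
    = if ¬x = y ∧ x / 2 = y / 2 ∧ 12 ≤ x / 2 ∧ x / 2 ≤ 12 then 1 else 0 := by
  split_ifs <;> omega

lemma pvCaseBasic (h1 h2 : List (String × Int)) (x1 x2 x3 x4 y1 y2 y3 y4 : Int)
    (e1 : h1.lookup "active1" = some x1) (e2 : h1.lookup "active2" = some x2)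
    (e3 : h1.lookup "passive1" = some x3) (e4 : h1.lookup "passive2" = some x4)
    (f1 : h2.lookup "active1" = some y1) (f2 : h2.lookup "active2" = some y2)
    (f3 : h2.lookup "passive1" = some y3) (f4 : h2.lookup "passive2" = some y4) :
    count_ability_matches h1 h2 "basic" = count_ability_matches_alt h1 h2 "basic" := by
  simp only [count_ability_matches, count_ability_matches_alt, pvCountB, pvFieldsB,
    e1, e2, e3, e4, f1, f2, f3, f4, List.foldl, pvStepAdd, Option.some.injEq, if_pos]
  norm_num
  linarith [pvFieldBasic x1 y1, pvFieldBasic x2 y2, pvFieldBasic x3 y3, pvFieldBasic x4 y4]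

lemma pvCaseAdvanced (h1 h2 : List (String × Int)) (x1 x2 x3 x4 y1 y2 y3 y4 : Int)
    (e1 : h1.lookup "active1" = some x1) (e2 : h1.lookup "active2" = some x2)
    (e3 : h1.lookup "passive1" = some x3) (e4 : h1.lookup "passive2" = some x4)
    (f1 : h2.lookup "active1" = some y1) (f2 : h2.lookup "active2" = some y2)
    (f3 : h2.lookup "passive1" = some y3) (f4 : h2.lookup "passive2" = some y4) :
    count_ability_matches h1 h2 "advanced" = count_ability_matches_alt h1 h2 "advanced" := by
  simp only [count_ability_matches, count_ability_matches_alt, pvCountB, pvFieldsB,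
    e1, e2, e3, e4, f1, f2, f3, f4, List.foldl, pvStepAdd, Option.some.injEq, String.reduceEq]
  norm_num
  linarith [pvFieldAdvanced x1 y1, pvFieldAdvanced x2 y2, pvFieldAdvanced x3 y3,
    pvFieldAdvanced x4 y4]

lemma pvCaseElite (h1 h2 : List (String × Int)) (x1 x2 x3 x4 y1 y2 y3 y4 : Int)
    (e1 : h1.lookup "active1" = some x1) (e2 : h1.lookup "active2" = some x2)
    (e3 : h1.lookup "passive1" = some x3) (e4 : h1.lookup "passive2" = some x4)
    (f1 : h2.lookup "active1" = some y1) (f2 : h2.lookup "active2" = some y2)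
    (f3 : h2.lookup "passive1" = some y3) (f4 : h2.lookup "passive2" = some y4) :
    count_ability_matches h1 h2 "elite" = count_ability_matches_alt h1 h2 "elite" := by
  simp only [count_ability_matches, count_ability_matches_alt, pvCountB, pvFieldsB,
    e1, e2, e3, e4, f1, f2, f3, f4, List.foldl, pvStepAdd, Option.some.injEq, String.reduceEq]
  norm_num
  linarith [pvFieldElite x1 y1, pvFieldElite x2 y2, pvFieldElite x3 y3, pvFieldElite x4 y4]

lemma pvCaseOther (h1 h2 : List (String × Int)) (t : String)
    (hb : t ≠ "basic") (ha : t ≠ "advanced") (he : t ≠ "elite") :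
    count_ability_matches h1 h2 t = count_ability_matches_alt h1 h2 t := by
  simp [count_ability_matches, count_ability_matches_alt, hb, ha, he]

lemma pvLookups (h1 h2 : List (String × Int)) (t : String)
    (hpre : Pre_count_ability_matches h1 h2 t)
    (ht : t = "basic" ∨ t = "advanced" ∨ t = "elite") :
    ∃ x1 x2 x3 x4 y1 y2 y3 y4 : Int,
      h1.lookup "active1" = some x1 ∧ h1.lookup "active2" = some x2 ∧
      h1.lookup "passive1" = some x3 ∧ h1.lookup "passive2" = some x4 ∧
      h2.lookup "active1" = some y1 ∧ h2.lookup "active2" = some y2 ∧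
      h2.lookup "passive1" = some y3 ∧ h2.lookup "passive2" = some y4 := by
  have k := hpre ht
  obtain ⟨x1, e1⟩ := Option.isSome_iff_exists.mp (k "active1" (by simp)).1
  obtain ⟨x2, e2⟩ := Option.isSome_iff_exists.mp (k "active2" (by simp)).1
  obtain ⟨x3, e3⟩ := Option.isSome_iff_exists.mp (k "passive1" (by simp)).1
  obtain ⟨x4, e4⟩ := Option.isSome_iff_exists.mp (k "passive2" (by simp)).1
  obtain ⟨y1, f1⟩ := Option.isSome_iff_exists.mp (k "active1" (by simp)).2
  obtain ⟨y2, f2⟩ := Option.isSome_iff_exists.mp (k "active2" (by simp)).2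
  obtain ⟨y3, f3⟩ := Option.isSome_iff_exists.mp (k "passive1" (by simp)).2
  obtain ⟨y4, f4⟩ := Option.isSome_iff_exists.mp (k "passive2" (by simp)).2
  exact ⟨x1, x2, x3, x4, y1, y2, y3, y4, e1, e2, e3, e4, f1, f2, f3, f4⟩

-- ===== VERDICT (by name: the statement is the Claim_ definition above) =====
theorem count_ability_matches_spec : Claim_equal_count_ability_matches := by
  intro h1 h2 t _dom hpre
  unfold Spec_count_ability_matches
  by_cases hb : t = "basic"
  · subst hb
    obtain ⟨x1, x2, x3, x4, y1, y2, y3, y4, e1, e2, e3, e4, f1, f2, f3, f4⟩ :=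
      pvLookups h1 h2 "basic" hpre (Or.inl rfl)
    exact pvCaseBasic h1 h2 x1 x2 x3 x4 y1 y2 y3 y4 e1 e2 e3 e4 f1 f2 f3 f4
  by_cases ha : t = "advanced"
  · subst ha
    obtain ⟨x1, x2, x3, x4, y1, y2, y3, y4, e1, e2, e3, e4, f1, f2, f3, f4⟩ :=
      pvLookups h1 h2 "advanced" hpre (Or.inr (Or.inl rfl))
    exact pvCaseAdvanced h1 h2 x1 x2 x3 x4 y1 y2 y3 y4 e1 e2 e3 e4 f1 f2 f3 f4
  by_cases he : t = "elite"
  · subst he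
    obtain ⟨x1, x2, x3, x4, y1, y2, y3, y4, e1, e2, e3, e4, f1, f2, f3, f4⟩ :=
      pvLookups h1 h2 "elite" hpre (Or.inr (Or.inr rfl))
    exact pvCaseElite h1 h2 x1 x2 x3 x4 y1 y2 y3 y4 e1 e2 e3 e4 f1 f2 f3 f4
  · exact pvCaseOther h1 h2 t hb ha he
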